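-- pv_equiv track=rewrite | github.com/its-arihant/100-Days-of-Code-Challenge | Day 31/31.py | count
-- ===== SOURCE A (Python) =====
-- def count(s):
--     a=s.split("|")
--     c=0
--     for i in range(0,len(a),2):
--         for j in a[i]:
--             if j=="*":
--                c+=1
--     return c
-- ===== SOURCE B (Python) =====
-- def count(s):
--     bars = 0
--     c = 0
--     for ch in s:
--         if ch == "|":
--             bars += 1
--         elif ch == "*" and bars % 2 == 0:
--             c += 1
--     return c
-- ===== Notes on version B (the rewrite author's own statement) =====
-- stated objective: simpler
-- what changed: Replaces split-on-separator plus a nested loop over even-indexed segments by one flat scan over the characters, counting stars only while the cumulative separator count is even.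
import Mathlib
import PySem

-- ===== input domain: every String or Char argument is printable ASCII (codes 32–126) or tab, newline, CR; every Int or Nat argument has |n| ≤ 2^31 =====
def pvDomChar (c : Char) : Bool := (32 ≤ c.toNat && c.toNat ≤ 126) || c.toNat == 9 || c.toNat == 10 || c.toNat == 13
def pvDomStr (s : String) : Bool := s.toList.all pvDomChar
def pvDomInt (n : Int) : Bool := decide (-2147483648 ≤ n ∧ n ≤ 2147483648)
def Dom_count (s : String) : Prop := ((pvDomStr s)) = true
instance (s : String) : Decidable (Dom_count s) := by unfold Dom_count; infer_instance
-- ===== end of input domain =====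

-- B replaces split-then-loop-over-even-segments by one flat scan with a '|'-parity counter (same O(n) cost, simpler shape).

-- ===== PORT A =====
def count (s : String) : Int :=
  let a := PySem.Chars.splitOn s.toList ['|']
  (PySem.List.pyRange 0 (a.length : Int) 2).foldl
    (fun c i => (PySem.List.pyGetD a i []).foldl
      (fun c j => if j = '*' then c + 1 else c) c) 0

-- ===== PORT B =====
def count_alt (s : String) : Int :=
  (s.toList.foldl
    (fun st ch =>
      if ch = '|' then (st.1 + 1, st.2)
      else if ch = '*' ∧ st.1 % 2 = 0 then (st.1, st.2 + 1)
      else st)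
    ((0 : Int), (0 : Int))).2

-- ===== PRECONDITION & SPEC =====
def Spec_count (s : String) (out : Int) : Prop := out = count_alt s
instance (s : String) (out : Int) : Decidable (Spec_count s out) := by unfold Spec_count; infer_instance

-- ===== CLAIM (what is proved, stated in full; the proofs are below) =====
def Claim_equal_count : Prop := ∀ (s : String), Dom_count s → Spec_count s (count s)

-- ===== LEMMAS AND PROOFS =====

-- stars l = number of '*' in l, as an Int
def stars (l : List Char) : Int := (l.countP (· == '*') : Int)

-- recursive characterisation of Python's split on the single separator '|'
def mysplit : List Char → List (List Char)
  | [] => [[]]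
  | c :: t => if c = '|' then [] :: mysplit t else (mysplit t).modifyHead (c :: ·)

-- T e segs: stars in the segments at even positions (e = true ↔ current position even)
def T : Bool → List (List Char) → Int
  | _, [] => 0
  | e, h :: t => (if e then stars h else 0) + T (!e) t

-- S e cs: flat-scan value, e = parity flag
def S : Bool → List Char → Int
  | _, [] => 0
  | e, c :: t => if c = '|' then S (!e) t else (if c = '*' ∧ e = true then 1 else 0) + S e t

theorem mysplit_ne_nil (l : List Char) : mysplit l ≠ [] := by
  cases l with
  | nil => simp [mysplit]
  | cons c t =>
    simp only [mysplit]
    split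
    · simp
    · cases h : mysplit t with
      | nil => exact absurd h (mysplit_ne_nil t)
      | cons a r => simp [List.modifyHead]

theorem go_spec (fuel : Nat) : ∀ (l cur : List Char) (accs : List (List Char)),
    l.length < fuel →
    PySem.Chars.splitOn.go ['|'] fuel l cur accs =
      accs.reverse ++ (mysplit l).modifyHead (cur.reverse ++ ·) := by
  induction fuel with
  | zero => intro l cur accs h; omega
  | succ f ih =>
    intro l cur accs h
    cases l with
    | nil =>
      rw [PySem.Chars.splitOn.go]
      · simp [mysplit, List.modifyHead]
      · simp
    | cons c rest =>
      rw [PySem.Chars.splitOn.go]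
      by_cases hc : c = '|'
      · have hp : ['|'].isPrefixOf (c :: rest) = true := by simp [hc, List.isPrefixOf]
        rw [if_pos hp]
        have hd : List.drop (['|'].length) (c :: rest) = rest := by simp
        rw [hd, ih rest [] (cur.reverse :: accs) (by simpa using Nat.lt_of_succ_lt_succ h)]
        cases hm : mysplit rest with
        | nil => exact absurd hm (mysplit_ne_nil rest)
        | cons a r => simp [mysplit, hc, hm, List.modifyHead]
      · have hp : ['|'].isPrefixOf (c :: rest) = false := by
          simp [List.isPrefixOf]; exact fun hh => hc hh.symm
        rw [hp]
        simp only [Bool.false_eq_true, if_false]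
        rw [ih rest (c :: cur) accs (Nat.lt_of_succ_lt_succ h)]
        cases hm : mysplit rest with
        | nil => exact absurd hm (mysplit_ne_nil rest)
        | cons a r => simp [mysplit, hc, hm, List.modifyHead]

theorem splitOn_eq_mysplit (l : List Char) :
    PySem.Chars.splitOn l ['|'] = mysplit l := by
  unfold PySem.Chars.splitOn
  rw [go_spec (l.length + 1) l [] [] (Nat.lt_succ_self _)]
  cases hm : mysplit l with
  | nil => exact absurd hm (mysplit_ne_nil l)
  | cons a r => simp [List.modifyHead]

theorem inner_foldl (l : List Char) (c : Int) :
    l.foldl (fun c j => if j = '*' then c + 1 else c) c = c + stars l := by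
  induction l generalizing c with
  | nil => simp [stars]
  | cons x t ih =>
    by_cases hx : x = '*' <;>
      simp [stars, hx, ih, List.countP_cons] <;> ring

theorem twoStepInd {α : Type} {P : List α → Prop}
    (h0 : P []) (h1 : ∀ x, P [x]) (h2 : ∀ x y t, P t → P (x :: y :: t)) :
    ∀ l, P l
  | [] => h0
  | [x] => h1 x
  | x :: y :: t => h2 x y t (twoStepInd h0 h1 h2 t)

theorem rangeFold (a : List (List Char)) : ∀ c : Int,
    (List.map (fun k : Nat => ((2 * k : Nat) : Int)) (List.range ((a.length + 1) / 2))).foldl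
      (fun c i => (PySem.List.pyGetD a i []).foldl
        (fun c j => if j = '*' then c + 1 else c) c) c
    = c + T true a := by
  induction a using twoStepInd with
  | h0 => intro c; simp [T]
  | h1 x =>
    intro c
    have h1 : (([x] : List (List Char)).length + 1) / 2 = 1 := by simp
    rw [h1]
    simp only [List.range_one, List.map_cons, List.map_nil, List.foldl_cons, List.foldl_nil,
      PySem.List.pyGetD_natCast, List.getD_cons_zero]
    rw [inner_foldl]
    simp [T, stars]
  | h2 x y t ih =>
    intro c
    have hl : ((x :: y :: t).length + 1) / 2 = (t.length + 1) / 2 + 1 := by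
      simp [List.length_cons]; omega
    rw [hl, List.range_succ_eq_map, List.map_cons, List.foldl_cons, List.map_map]
    rw [PySem.List.pyGetD_natCast, List.getD_cons_zero, inner_foldl]
    have hcong :
        List.foldl
          (fun c i => (PySem.List.pyGetD (x :: y :: t) i []).foldl
            (fun c j => if j = '*' then c + 1 else c) c) (c + stars x)
          (List.map ((fun k : Nat => ((2 * k : Nat) : Int)) ∘ Nat.succ) (List.range ((t.length + 1) / 2)))
        = List.foldl
          (fun c i => (PySem.List.pyGetD t i []).foldl
            (fun c j => if j = '*' then c + 1 else c) c) (c + stars x)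
          (List.map (fun k : Nat => ((2 * k : Nat) : Int)) (List.range ((t.length + 1) / 2))) := by
      rw [List.foldl_map, List.foldl_map]
      apply PySem.List.foldl_congr_mem
      intro acc k _
      have e1 : ((fun k : Nat => ((2 * k : Nat) : Int)) ∘ Nat.succ) k = ((2 * k + 2 : Nat) : Int) := by
        simp [Function.comp]; push_cast; ring
      rw [e1, PySem.List.pyGetD_natCast, PySem.List.pyGetD_natCast]
      have e3 : (x :: y :: t).getD (2 * k + 2) [] = t.getD (2 * k) [] := by
        simp [List.getD_cons_succ]
      rw [e3]
    rw [hcong, ih]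
    have hT : T true (x :: y :: t) = stars x + T true t := by
      simp [T]
    rw [hT]; ring

theorem pyRangeFold (a : List (List Char)) :
    (PySem.List.pyRange 0 (a.length : Int) 2).foldl
      (fun c i => (PySem.List.pyGetD a i []).foldl
        (fun c j => if j = '*' then c + 1 else c) c) 0 = T true a := by
  have hr : PySem.List.pyRange 0 (a.length : Int) 2 =
      List.map (fun k : Nat => ((2 * k : Nat) : Int)) (List.range ((a.length + 1) / 2)) := by
    rw [PySem.List.pyRange_of_pos 0 (a.length : Int) (by norm_num)]
    have hcnt : (if (0 : Int) < (a.length : Int)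
        then (((a.length : Int) - 0 + 2 - 1) / 2).toNat else 0) = (a.length + 1) / 2 := by
      split <;> omega
    rw [hcnt]
    apply List.map_congr_left
    intro k _
    push_cast
    ring
  rw [hr]
  simpa using rangeFold a 0

theorem A_eq (s : String) : count s = T true (mysplit s.toList) := by
  unfold count
  dsimp only
  rw [splitOn_eq_mysplit]
  exact pyRangeFold (mysplit s.toList)

theorem S_eq_T (cs : List Char) : ∀ e, S e cs = T e (mysplit cs) := by
  induction cs with
  | nil => intro e; cases e <;> simp [S, T, mysplit, stars]
  | cons c t ih =>
    intro e
    by_cases hc : c = '|'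
    · subst hc
      have hS : S e ('|' :: t) = S (!e) t := by cases e <;> simp [S]
      rw [hS, ih (!e)]
      have hm : mysplit ('|' :: t) = [] :: mysplit t := by simp [mysplit]
      rw [hm]
      cases e <;> simp [T, stars]
    · cases hm : mysplit t with
      | nil => exact absurd hm (mysplit_ne_nil t)
      | cons h r =>
        have hT : T e (mysplit (c :: t)) =
            (if e then stars (c :: h) else 0) + T (!e) r := by
          simp [mysplit, hc, hm, List.modifyHead, T]
        have hs : stars (c :: h) = (if c = '*' then 1 else 0) + stars h := by
          by_cases h2 : c = '*' <;> simp [stars, List.countP_cons, h2] <;> ring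
        have hS : S e (c :: t) = (if c = '*' ∧ e = true then 1 else 0) + S e t := by
          simp [S, hc]
        rw [hS, ih, hm, hT, hs]
        have hTe : T e (h :: r) = (if e then stars h else 0) + T (!e) r := by simp [T]
        rw [hTe]
        cases e <;> by_cases h2 : c = '*' <;> simp [h2] <;> ring

theorem parity_flip (b : Int) : (decide ((b + 1) % 2 = 0)) = !(decide (b % 2 = 0)) := by
  rcases Int.emod_two_eq b with h | h
  · have h3 : (b + 1) % 2 = 1 := by omega
    simp [h, h3]
  · have h3 : (b + 1) % 2 = 0 := by omega
    simp [h, h3]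

def numbars (cs : List Char) : Int := (cs.countP (· == '|') : Int)

theorem B_inv (cs : List Char) (b c : Int) :
    cs.foldl
      (fun st ch =>
        if ch = '|' then (st.1 + 1, st.2)
        else if ch = '*' ∧ st.1 % 2 = 0 then (st.1, st.2 + 1)
        else st) (b, c)
    = (b + numbars cs, c + S (decide (b % 2 = 0)) cs) := by
  induction cs generalizing b c with
  | nil => simp [numbars, S]
  | cons ch t ih =>
    by_cases hch : ch = '|'
    · simp only [List.foldl_cons]
      rw [if_pos hch, ih (b + 1) c]
      have hn : numbars ('|' :: t) = numbars t + 1 := by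
        simp [numbars, List.countP_cons]
      subst hch
      have hS : S (decide (b % 2 = 0)) ('|' :: t) = S (!decide (b % 2 = 0)) t := by
        cases h : decide (b % 2 = 0) <;> simp [S]
      rw [hn, hS, ← parity_flip]
      simp only [Prod.mk.injEq]
      constructor <;> first | ring | trivial
    · have hn : numbars (ch :: t) = numbars t := by
        simp [numbars, List.countP_cons, hch]
      by_cases hst : ch = '*' ∧ b % 2 = 0
      · simp only [List.foldl_cons]
        rw [if_neg hch, if_pos hst, ih b (c + 1), hn]
        have hS : S (decide (b % 2 = 0)) (ch :: t) =
            1 + S (decide (b % 2 = 0)) t := by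
          simp [S, hch, hst.1, hst.2]
        rw [hS]
        simp only [Prod.mk.injEq]
        constructor <;> first | ring | trivial
      · simp only [List.foldl_cons]
        rw [if_neg hch, if_neg hst, ih b c, hn]
        have hS : S (decide (b % 2 = 0)) (ch :: t) = S (decide (b % 2 = 0)) t := by
          by_cases h2 : ch = '*'
          · have hb : ¬ b % 2 = 0 := fun hb => hst ⟨h2, hb⟩
            simp [S, hch, h2, hb]
          · simp [S, hch, h2]
        rw [hS]

theorem B_eq (s : String) : count_alt s = S true s.toList := by
  unfold count_alt
  rw [B_inv s.toList 0 0]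
  norm_num


-- ===== VERDICT (by name: the statement is the Claim_ definition above) =====
theorem count_spec : Claim_equal_count := by
  intro s _
  unfold Spec_count
  rw [A_eq, B_eq, S_eq_T]
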